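-- pv_equiv track=rewrite | github.com/ToyotaInfoTech/RAMN | scripts/canboot/canboot.py | breakIn8byteChunk
-- ===== SOURCE A (Python) =====
-- def breakIn8byteChunk(data):
--     div = len(data) // 8
--     mod = len(data) % 8
--     for i in range(0,div):
--         res = ""
--         for j in range(0,8):
--             res += "{:02x}".format(data[i*8 + j])
--         yield res
--     if mod != 0:
--         res = ""
--         for i in range(0,mod):
--             res += "{:02x}".format(data[div*8 + i])
--         yield res
-- ===== SOURCE B (Python) =====
-- def breakIn8byteChunk(data):
--     i = 0
--     n = len(data)
--     while i < n:
--         yield "".join("{:02x}".format(b) for b in data[i:i+8])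
--         i += 8
-- ===== Notes on version B (the rewrite author's own statement) =====
-- stated objective: simpler
-- what changed: Replaces the div/mod index arithmetic and the two separately-coded loops (full chunks plus a final remainder branch) by a single head-slicing loop that peels rest[:8] off the front and joins its hex digits, so no index computation and no remainder branch exist.
import Mathlib
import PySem

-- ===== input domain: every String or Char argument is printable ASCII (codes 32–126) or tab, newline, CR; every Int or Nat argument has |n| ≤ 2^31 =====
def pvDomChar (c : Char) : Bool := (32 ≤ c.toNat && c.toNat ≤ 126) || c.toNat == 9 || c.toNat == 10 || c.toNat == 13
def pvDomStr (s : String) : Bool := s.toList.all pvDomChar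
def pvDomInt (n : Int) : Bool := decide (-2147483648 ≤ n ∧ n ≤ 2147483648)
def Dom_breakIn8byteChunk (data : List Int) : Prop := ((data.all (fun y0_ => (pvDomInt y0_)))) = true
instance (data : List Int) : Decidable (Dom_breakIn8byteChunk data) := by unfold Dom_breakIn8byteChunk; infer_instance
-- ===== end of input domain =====

-- B replaces A's div/mod index arithmetic and separate remainder branch by one head-slicing loop (simpler; same cost).

-- "{:02x}".format(n): lowercase hex of |n|, '-' in front for negative n, zero-filled to width 2
-- (sign-aware fill). Ported by hand (PySem has no hex formatter); exact for every Int.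
def fmtHexDigit (d : Nat) : Char := if d < 10 then Char.ofNat (48 + d) else Char.ofNat (87 + d)

def toHexChars (n : Nat) : List Char :=
  if h : n < 16 then [fmtHexDigit n]
  else toHexChars (n / 16) ++ [fmtHexDigit (n % 16)]
decreasing_by exact Nat.div_lt_self (by omega) (by omega)

def fmt02x (n : Int) : String :=
  PySem.Str.zfill (String.ofList ((if n < 0 then ['-'] else []) ++ toHexChars n.natAbs)) 2

-- ===== PORT A =====
-- inner loop "for j in range(0,8): res += …" / the remainder loop, counting cnt indices from start
def aFor (data : List Int) (start cnt : Nat) (res : String) : String :=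
  match cnt with
  | 0 => res
  | k + 1 => aFor data (start + 1) k (res ++ fmt02x (PySem.List.pyGetD data (start : Int) 0))

-- outer loop "for i in range(0,div): … yield res"
def aOuter (data : List Int) (i d : Nat) (acc : List String) : List String :=
  match d with
  | 0 => acc
  | k + 1 => aOuter data (i + 1) k (acc ++ [aFor data (i * 8) 8 ""])

def breakIn8byteChunk (data : List Int) : List String :=
  let dv := data.length / 8
  let md := data.length % 8
  let out := aOuter data 0 dv []
  if md ≠ 0 then out ++ [aFor data (dv * 8) md ""] else out

-- ===== PORT B =====
-- "while i < n: yield ''.join(…) for data[i:i+8]; i += 8"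
def altGo (data : List Int) (i : Nat) : List String :=
  if i < data.length then
    PySem.Str.join "" ((PySem.List.slice data (some (i : Int)) (some ((i : Int) + 8))).map fmt02x)
      :: altGo data (i + 8)
  else []
termination_by data.length - i

def breakIn8byteChunk_alt (data : List Int) : List String :=
  altGo data 0

-- ===== PRECONDITION & SPEC =====
def Spec_breakIn8byteChunk (data : List Int) (out : List String) : Prop := out = breakIn8byteChunk_alt data
instance (data : List Int) (out : List String) : Decidable (Spec_breakIn8byteChunk data out) := by unfold Spec_breakIn8byteChunk; infer_instance

-- ===== CLAIM (what is proved, stated in full; the proofs are below) =====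
def Claim_equal_breakIn8byteChunk : Prop := ∀ (data : List Int), Dom_breakIn8byteChunk data → Spec_breakIn8byteChunk data (breakIn8byteChunk data)

-- ===== LEMMAS AND PROOFS =====

theorem strJoin_cons (s : String) (l : List String) :
    PySem.Str.join "" (s :: l) = s ++ PySem.Str.join "" l := by
  rw [← String.toList_inj]
  simp [PySem.Str.join, PySem.Chars.join, List.intercalate]
  cases l <;> simp

theorem altGo_chunk (data : List Int) (i : Nat) (h : i < data.length) :
    altGo data i =
      PySem.Str.join "" (((data.drop i).take 8).map fmt02x) :: altGo data (i + 8) := by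
  rw [altGo, if_pos h]
  congr 2
  have : ((i : Int) + 8) = ((i + 8 : Nat) : Int) := by push_cast; ring
  rw [this, PySem.List.slice_natCast, show i + 8 - i = 8 by omega]

theorem altGo_shift (data : List Int) (m : Nat) : ∀ i, data.length - i ≤ m →
    altGo data (i + 8) = altGo (data.drop 8) i := by
  induction m with
  | zero =>
    intro i h
    rw [altGo, if_neg (by omega)]
    rw [altGo, if_neg (by simp [List.length_drop]; omega)]
  | succ m ih =>
    intro i h
    by_cases hi : i + 8 < data.length
    · rw [altGo_chunk data (i + 8) hi,
          altGo_chunk (data.drop 8) i (by simp [List.length_drop]; omega),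
          List.drop_drop, ih (i + 8) (by omega),
          show i + 8 = 8 + i by ring]
    · rw [altGo, if_neg (by omega)]
      rw [altGo, if_neg (by simp [List.length_drop]; omega)]

theorem alt_eq (data : List Int) :
    breakIn8byteChunk_alt data =
      if data = [] then []
      else PySem.Str.join "" ((data.take 8).map fmt02x) :: breakIn8byteChunk_alt (data.drop 8) := by
  by_cases h : data = []
  · subst h
    rw [if_pos rfl, breakIn8byteChunk_alt, altGo]
    simp
  · rw [if_neg h, breakIn8byteChunk_alt, breakIn8byteChunk_alt,
        altGo_chunk data 0 (List.length_pos_of_ne_nil h),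
        show (0 + 8 : Nat) = 0 + 8 by rfl,
        altGo_shift data (data.length) 0 (by omega)]
    simp

theorem aFor_eq (data : List Int) (cnt : Nat) : ∀ (start : Nat) (res : String),
    start + cnt ≤ data.length →
    aFor data start cnt res = res ++ PySem.Str.join "" (((data.drop start).take cnt).map fmt02x) := by
  induction cnt with
  | zero =>
    intro start res h
    rw [← String.toList_inj]
    simp [aFor, PySem.Str.join, PySem.Chars.join, List.intercalate]
  | succ k ih =>
    intro start res h
    have hs : start < data.length := by omega
    rw [aFor, ih (start + 1) _ (by omega),
        List.drop_eq_getElem_cons hs, List.take_succ_cons, List.map_cons, strJoin_cons]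
    simp [PySem.List.pyGetD_natCast, List.getD_eq_getElem?_getD, hs, String.append_assoc]

theorem aOuter_acc (data : List Int) (d : Nat) : ∀ (i : Nat) (acc : List String),
    aOuter data i d acc = acc ++ aOuter data i d [] := by
  induction d with
  | zero => intro i acc; simp [aOuter]
  | succ k ih =>
    intro i acc
    rw [aOuter, aOuter, ih (i + 1), ih (i + 1) ([] ++ _)]
    simp

theorem aOuter_shift (data : List Int) (d : Nat) : ∀ (i : Nat) (acc : List String),
    (i + 1 + d) * 8 ≤ data.length →
    aOuter data (i + 1) d acc = aOuter (data.drop 8) i d acc := by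
  induction d with
  | zero => intro i acc h; rfl
  | succ k ih =>
    intro i acc h
    have hc : aFor data ((i + 1) * 8) 8 "" = aFor (data.drop 8) (i * 8) 8 "" := by
      rw [aFor_eq data 8 ((i + 1) * 8) "" (by omega),
          aFor_eq (data.drop 8) 8 (i * 8) "" (by simp [List.length_drop]; omega),
          List.drop_drop, show 8 + i * 8 = (i + 1) * 8 by ring]
    rw [aOuter, aOuter, hc]
    exact ih (i + 1) _ (by omega)

theorem main_aux (n : Nat) : ∀ data : List Int, data.length ≤ n →
    breakIn8byteChunk data = breakIn8byteChunk_alt data := by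
  induction n with
  | zero =>
    intro data hlen
    have hz : data = [] := by
      cases data with
      | nil => rfl
      | cons a l => simp at hlen
    subst hz
    rw [alt_eq]
    simp [breakIn8byteChunk, aOuter]
  | succ n ih =>
    intro data hlen
    by_cases hsmall : data.length < 8
    · by_cases hz : data = []
      · subst hz
        rw [alt_eq]
        simp [breakIn8byteChunk, aOuter]
      · have hpos : 0 < data.length := List.length_pos_of_ne_nil hz
        have hdv : data.length / 8 = 0 := Nat.div_eq_of_lt hsmall
        have hmd : data.length % 8 = data.length := Nat.mod_eq_of_lt hsmall
        rw [alt_eq, if_neg hz]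
        simp only [breakIn8byteChunk, hdv, hmd]
        rw [if_pos (by omega), aFor_eq data data.length 0 "" (by omega)]
        have ht : data.take 8 = data := List.take_of_length_le (by omega)
        have hd : data.drop 8 = [] := List.drop_eq_nil_of_le (by omega)
        rw [alt_eq]
        simp [aOuter, ht, hd, List.take_of_length_le (le_refl data.length)]
    · -- data.length ≥ 8 : peel one full chunk off the front
      have h8 : 8 ≤ data.length := by omega
      have hz : data ≠ [] := by intro hn; rw [hn] at h8; simp at h8
      have hLd : (data.drop 8).length = data.length - 8 := by simp
      have hdm := Nat.div_add_mod data.length 8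
      have hdm' := Nat.div_add_mod (data.length - 8) 8
      have hdv : data.length / 8 = (data.length - 8) / 8 + 1 := by omega
      have hmd : data.length % 8 = (data.length - 8) % 8 := by omega
      -- A's outer loop on data is chunk0 followed by A's outer loop on data.drop 8
      have houter : aOuter data 0 (data.length / 8) [] =
          aFor data 0 8 "" :: aOuter (data.drop 8) 0 ((data.length - 8) / 8) [] := by
        rw [hdv, aOuter, aOuter_shift data _ 0 _ (by omega), aOuter_acc]
        simp
      have hchunk0 : aFor data 0 8 "" =
          PySem.Str.join "" ((data.take 8).map fmt02x) := by
        rw [aFor_eq data 8 0 "" (by omega)]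
        simp
      have htail : aFor data ((data.length / 8) * 8) (data.length % 8) "" =
          aFor (data.drop 8) (((data.length - 8) / 8) * 8) ((data.length - 8) % 8) "" := by
        rw [aFor_eq data (data.length % 8) ((data.length / 8) * 8) "" (by omega),
            aFor_eq (data.drop 8) ((data.length - 8) % 8) (((data.length - 8) / 8) * 8) ""
              (by rw [hLd]; omega),
            List.drop_drop, ← hmd,
            show 8 + (data.length - 8) / 8 * 8 = data.length / 8 * 8 by omega]
      rw [alt_eq, if_neg hz, ← hchunk0, ← ih (data.drop 8) (by rw [hLd]; omega)]
      simp only [breakIn8byteChunk, hLd, houter, htail]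
      by_cases hm : data.length % 8 = 0
      · rw [if_neg (by omega), if_neg (by omega)]
      · rw [if_pos (by omega), if_pos (by omega)]
        simp

theorem main_eq (data : List Int) : breakIn8byteChunk data = breakIn8byteChunk_alt data :=
  main_aux data.length data (le_refl _)

-- ===== VERDICT (by name: the statement is the Claim_ definition above) =====
theorem breakIn8byteChunk_spec : Claim_equal_breakIn8byteChunk := by
  intro data _
  unfold Spec_breakIn8byteChunk
  exact main_eq data
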